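-- pv_equiv track=rewrite | github.com/menghaowei/Detect-seq | src/detect_seq/mpmat-to-art-sgRNA.py | signal_dist_penalty
-- ===== SOURCE A (Python) =====
-- def signal_dist_penalty(dist_to_signal,
--                         region_break_list=(-10, -5, 0, 8, 15),
--                         region_k_list=(-4, -2, 0, 0, 2, 4),
--                         region_offset_list=(0, 0, 0, 0, 0, 0)):
--     """
--     INPUT
--         <dist_to_signal>
--             int, negative num means signal at upstream;
--                  positive num means signal at downstream
--
--         <region_break_list>
--             list or tuple, n breaks will create n+1 regions from -Inf to +Inf
--
--         <region_k_list>
--             list or tuple, each k match relative region and penalty score in such region = k * dist length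
--
--         <region_offset_list>
--             list or tuple, each offset match relative region
--
--         penalty score = k * dist length + offset
--
--     RETURN
--         <penalty_score>
--
--     INFO
--         This function can calculate penalty score related to the distance bewteen signal and alignment.
--
--     """
--     region_count = len(region_break_list) + 1
--     region_len_list = [0] * region_count
--
--     # get region 0 start
--     region_zero_idx = -1
--     region_dist_idx = -1
--
--     for region_idx, region_break in enumerate(region_break_list):
--         if region_zero_idx == -1:
--             if 0 < region_break:
--                 region_zero_idx = region_idx
--
--         if region_dist_idx == -1:
--             if dist_to_signal < region_break:
--                 region_dist_idx = region_idx
--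
--         if region_idx > 0:
--             region_len_list[region_idx] = region_break - region_break_list[region_idx - 1]
--
--     if region_zero_idx == -1:
--         region_zero_idx = region_count - 1
--
--     if region_dist_idx == -1:
--         region_dist_idx = region_count - 1
--
--     penalty_score = 0
--     accum_dist = 0
--     if region_dist_idx >= region_zero_idx:
--         for run_idx in range(region_zero_idx, region_dist_idx):
--             penalty_score += region_k_list[run_idx] * region_len_list[run_idx] + region_offset_list[run_idx]
--             accum_dist += region_len_list[run_idx]
--
--         penalty_score += region_k_list[region_dist_idx] * (dist_to_signal - accum_dist) + region_offset_list[
--             region_dist_idx]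
--
--     else:
--         for run_idx in range(region_dist_idx + 1, region_zero_idx):
--             penalty_score += -1 * region_k_list[run_idx] * region_len_list[run_idx] + region_offset_list[run_idx]
--             accum_dist += region_len_list[run_idx]
--
--         penalty_score += -1 * region_k_list[region_dist_idx] * (accum_dist - dist_to_signal) + region_offset_list[
--             region_dist_idx]
--
--     return penalty_score
-- ===== SOURCE B (Python) =====
-- def signal_dist_penalty(dist_to_signal,
--                         region_break_list=(-10, -5, 0, 8, 15),
--                         region_k_list=(-4, -2, 0, 0, 2, 4),
--                         region_offset_list=(0, 0, 0, 0, 0, 0)):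
--     # Prefix-table reformulation: build three cumulative tables once
--     # (region widths, forward scores k*w+off, backward scores -k*w+off);
--     # each branch is then a constant-time difference of two prefix entries.
--     rb, ks, offs = region_break_list, region_k_list, region_offset_list
--     n = len(rb)
--     P_len = [0, 0]
--     P_fwd = [0, offs[0]]   # region 0 has width 0, carries only its offset
--     P_bwd = [0, 0]
--     for hi, lo, k, off in zip(rb[1:], rb, ks[1:], offs[1:]):
--         w = hi - lo
--         P_len.append(P_len[-1] + w)
--         P_fwd.append(P_fwd[-1] + k * w + off)
--         P_bwd.append(P_bwd[-1] - k * w + off)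
--     zero = next((i for i, b in enumerate(rb) if 0 < b), n)
--     d = next((i for i, b in enumerate(rb) if dist_to_signal < b), n)
--     if d >= zero:
--         return (P_fwd[d] - P_fwd[zero]) \
--             + ks[d] * (dist_to_signal - (P_len[d] - P_len[zero])) + offs[d]
--     else:
--         return (P_bwd[zero] - P_bwd[d + 1]) \
--             - ks[d] * ((P_len[zero] - P_len[d + 1]) - dist_to_signal) + offs[d]
-- ===== Notes on version B (the rewrite author's own statement) =====
-- stated objective: alternative
-- what changed: B precomputes three cumulative prefix tables over the regions (widths, forward scores k*w+offset, backward scores -k*w+offset) in one staged pass over zipped neighbours, and then each branch of the answer is a constant-time difference of two prefix entries, replacing A's region-length table plus per-branch running-accumulator loops.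
import Mathlib
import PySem

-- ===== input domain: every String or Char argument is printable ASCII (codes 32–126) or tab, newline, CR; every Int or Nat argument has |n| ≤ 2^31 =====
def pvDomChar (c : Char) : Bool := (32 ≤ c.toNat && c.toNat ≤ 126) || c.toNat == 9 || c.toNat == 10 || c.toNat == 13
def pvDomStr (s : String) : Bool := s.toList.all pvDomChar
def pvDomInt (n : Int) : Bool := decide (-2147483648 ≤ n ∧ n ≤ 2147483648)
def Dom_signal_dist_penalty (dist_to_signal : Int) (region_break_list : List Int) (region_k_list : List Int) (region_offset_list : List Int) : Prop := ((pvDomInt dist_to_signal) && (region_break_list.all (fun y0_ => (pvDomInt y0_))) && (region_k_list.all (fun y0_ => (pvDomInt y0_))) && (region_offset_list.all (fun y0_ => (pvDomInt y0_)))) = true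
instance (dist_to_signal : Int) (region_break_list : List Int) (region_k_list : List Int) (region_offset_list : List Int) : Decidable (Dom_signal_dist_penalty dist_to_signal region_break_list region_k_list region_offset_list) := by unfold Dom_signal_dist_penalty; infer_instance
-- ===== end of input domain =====

-- B recomputes the same piecewise-linear penalty from three cumulative prefix tables
-- (region widths, forward scores, backward scores) built in one staged pass, after which
-- each branch is a constant-time difference of two prefix entries, replacing A's
-- region-length table and per-branch running-accumulator loops (objective: alternative).

-- ===== PORT A =====
-- Literal port of A.  Python list indexing raises IndexError out of range; under
-- Pre_signal_dist_penalty every index taken below is in range, so pyGetD _ _ 0 is exact there.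
def signal_dist_penalty (dist_to_signal : Int) (region_break_list : List Int) (region_k_list : List Int) (region_offset_list : List Int) : Int :=
  let region_count : Nat := region_break_list.length + 1
  let st := (PySem.List.enumerate region_break_list 0).foldl
    (fun (st : Int × Int × List Int) (p : Int × Int) =>
      (if st.1 = -1 ∧ 0 < p.2 then p.1 else st.1,
       if st.2.1 = -1 ∧ dist_to_signal < p.2 then p.1 else st.2.1,
       if p.1 > 0 then PySem.List.pySetD st.2.2 p.1 (p.2 - PySem.List.pyGetD region_break_list (p.1 - 1) 0) else st.2.2))
    (-1, -1, List.replicate region_count 0)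
  let region_zero_idx : Int := if st.1 = -1 then (region_count : Int) - 1 else st.1
  let region_dist_idx : Int := if st.2.1 = -1 then (region_count : Int) - 1 else st.2.1
  if region_dist_idx ≥ region_zero_idx then
    let s := (PySem.List.pyRange region_zero_idx region_dist_idx 1).foldl
      (fun (s : Int × Int) run_idx =>
        (s.1 + PySem.List.pyGetD region_k_list run_idx 0 * PySem.List.pyGetD st.2.2 run_idx 0
             + PySem.List.pyGetD region_offset_list run_idx 0,
         s.2 + PySem.List.pyGetD st.2.2 run_idx 0)) (0, 0)
    s.1 + PySem.List.pyGetD region_k_list region_dist_idx 0 * (dist_to_signal - s.2)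
        + PySem.List.pyGetD region_offset_list region_dist_idx 0
  else
    let s := (PySem.List.pyRange (region_dist_idx + 1) region_zero_idx 1).foldl
      (fun (s : Int × Int) run_idx =>
        (s.1 + (-1) * PySem.List.pyGetD region_k_list run_idx 0 * PySem.List.pyGetD st.2.2 run_idx 0
             + PySem.List.pyGetD region_offset_list run_idx 0,
         s.2 + PySem.List.pyGetD st.2.2 run_idx 0)) (0, 0)
    s.1 + (-1) * PySem.List.pyGetD region_k_list region_dist_idx 0 * (s.2 - dist_to_signal)
        + PySem.List.pyGetD region_offset_list region_dist_idx 0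

-- ===== PORT B =====
-- Literal port of Source B.  The zip over (rb[1:], rb, ks[1:], offs[1:]) is the nested List.zip;
-- P[-1] is PySem.List.pyGetD _ (-1) 0 (exact: the lists are never empty); next(..., n) is
-- findIdx?.getD n; Python indexing at the nonnegative in-range indices B uses is List.getD
-- under Pre_; offs[0] is pyGetD offs 0 0 (in range under Pre_).
def signal_dist_penalty_alt (dist_to_signal : Int) (region_break_list : List Int) (region_k_list : List Int) (region_offset_list : List Int) : Int :=
  let n := region_break_list.length
  let tbl := (((region_break_list.drop 1).zip region_break_list).zip
      ((region_k_list.drop 1).zip (region_offset_list.drop 1))).foldl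
    (fun (P : List Int × List Int × List Int) e =>
      let w := e.1.1 - e.1.2
      (P.1 ++ [PySem.List.pyGetD P.1 (-1) 0 + w],
       P.2.1 ++ [PySem.List.pyGetD P.2.1 (-1) 0 + e.2.1 * w + e.2.2],
       P.2.2 ++ [PySem.List.pyGetD P.2.2 (-1) 0 - e.2.1 * w + e.2.2]))
    ([0, 0], [0, PySem.List.pyGetD region_offset_list 0 0], [0, 0])
  let zero := (region_break_list.findIdx? (fun b => decide (0 < b))).getD n
  let d := (region_break_list.findIdx? (fun b => decide (dist_to_signal < b))).getD n
  if d ≥ zero then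
    (tbl.2.1.getD d 0 - tbl.2.1.getD zero 0)
      + region_k_list.getD d 0 * (dist_to_signal - (tbl.1.getD d 0 - tbl.1.getD zero 0))
      + region_offset_list.getD d 0
  else
    (tbl.2.2.getD zero 0 - tbl.2.2.getD (d + 1) 0)
      - region_k_list.getD d 0 * ((tbl.1.getD zero 0 - tbl.1.getD (d + 1) 0) - dist_to_signal)
      + region_offset_list.getD d 0

-- ===== PRECONDITION & SPEC =====
-- Pre_ admits exactly the inputs on which A returns: every region index A touches (they all
-- lie between the zero region and the dist region, whose positions are the first break > 0
-- and the first break > dist) must exist in the k and offset lists; otherwise A raises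
-- IndexError on the corresponding list access.
def Pre_signal_dist_penalty (dist_to_signal : Int) (region_break_list : List Int) (region_k_list : List Int) (region_offset_list : List Int) : Prop :=
  let n := region_break_list.length
  let zero := (region_break_list.findIdx? (fun b => decide (0 < b))).getD n
  let d := (region_break_list.findIdx? (fun b => decide (dist_to_signal < b))).getD n
  (if zero ≤ d then d else zero - 1) < region_k_list.length ∧
  (if zero ≤ d then d else zero - 1) < region_offset_list.length
instance (dist_to_signal : Int) (region_break_list : List Int) (region_k_list : List Int) (region_offset_list : List Int) : Decidable (Pre_signal_dist_penalty dist_to_signal region_break_list region_k_list region_offset_list) := by unfold Pre_signal_dist_penalty; infer_instance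
def pvWitness_signal_dist_penalty : Int × List Int × List Int × List Int :=
  (3, [-10, -5, 0, 8, 15], [-4, -2, 0, 0, 2, 4], [0, 0, 0, 0, 0, 0])

def Spec_signal_dist_penalty (dist_to_signal : Int) (region_break_list : List Int) (region_k_list : List Int) (region_offset_list : List Int) (out : Int) : Prop := out = signal_dist_penalty_alt dist_to_signal region_break_list region_k_list region_offset_list
instance (dist_to_signal : Int) (region_break_list : List Int) (region_k_list : List Int) (region_offset_list : List Int) (out : Int) : Decidable (Spec_signal_dist_penalty dist_to_signal region_break_list region_k_list region_offset_list out) := by unfold Spec_signal_dist_penalty; infer_instance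

-- ===== CLAIM (what is proved, stated in full; the proofs are below) =====
def Claim_equal_signal_dist_penalty : Prop := ∀ (dist_to_signal : Int) (region_break_list : List Int) (region_k_list : List Int) (region_offset_list : List Int), Dom_signal_dist_penalty dist_to_signal region_break_list region_k_list region_offset_list → Pre_signal_dist_penalty dist_to_signal region_break_list region_k_list region_offset_list → Spec_signal_dist_penalty dist_to_signal region_break_list region_k_list region_offset_list (signal_dist_penalty dist_to_signal region_break_list region_k_list region_offset_list)

-- ===== LEMMAS AND PROOFS =====

lemma pv_firstIdx_fold (q : Int → Prop) [DecidablePred q] (l : List Int) (s z : Int) (hs : 0 ≤ s) :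
    (PySem.List.enumerate l s).foldl (fun z p => if z = -1 ∧ q p.2 then p.1 else z) z
    = if z = -1 then
        (match l.findIdx? (fun b => decide (q b)) with
         | some k => s + (k : Int)
         | none => -1)
      else z := by
  induction l generalizing s z with
  | nil =>
    simp only [PySem.List.enumerate_nil, List.foldl_nil, List.findIdx?_nil]
    split <;> simp_all
  | cons x xs ih =>
    rw [PySem.List.enumerate_cons]
    simp only [List.foldl_cons, List.findIdx?_cons]
    rw [ih _ _ (by omega)]
    by_cases hz : z = -1
    · by_cases hq : q x
      · have hsne : ¬ (s = -1) := by omega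
        simp [hz, hq, hsne]
      · cases xs.findIdx? (fun b => decide (q b)) with
        | none => simp [hz, hq]
        | some k => simp [hz, hq]; ring
    · simp [hz]

lemma pv_set_fold (g : Int → Int → Int) (xs : List Int) (ll : List Int) (s : Int) (hs : 0 ≤ s)
    (hlen : s.toNat + xs.length ≤ ll.length) (j : Nat) :
    ((PySem.List.enumerate xs s).foldl
        (fun ll p => if p.1 > 0 then PySem.List.pySetD ll p.1 (g p.1 p.2) else ll) ll).getD j 0
    = if 1 ≤ j ∧ s ≤ (j : Int) ∧ (j : Int) < s + xs.length then
        g j (xs.getD ((j : Int) - s).toNat 0)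
      else ll.getD j 0 := by
  induction xs generalizing s ll with
  | nil =>
    simp only [PySem.List.enumerate_nil, List.foldl_nil, List.length_nil, Nat.cast_zero, add_zero]
    rw [if_neg (by omega)]
  | cons x xs ih =>
    rw [PySem.List.enumerate_cons]
    simp only [List.foldl_cons]
    have hlen' : (s + 1).toNat + xs.length ≤
        (if s > 0 then PySem.List.pySetD ll s (g s x) else ll).length := by
      simp only [List.length_cons] at hlen
      split
      · simp only [PySem.List.length_pySetD]; omega
      · omega
    rw [ih _ _ (by omega) hlen']
    by_cases hmid : 1 ≤ j ∧ s + 1 ≤ (j : Int) ∧ (j : Int) < s + 1 + xs.length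
    · have houter : 1 ≤ j ∧ s ≤ (j : Int) ∧ (j : Int) < s + (x :: xs).length := by
        simp only [List.length_cons]; push_cast; omega
      rw [if_pos hmid, if_pos houter]
      have h1 : ((j : Int) - s).toNat = (((j : Int) - (s + 1)).toNat) + 1 := by omega
      rw [h1, List.getD_cons_succ]
    · rw [if_neg hmid]
      by_cases hj : (j : Int) = s ∧ 0 < s
      · have hjlt : j < ll.length := by simp at hlen; omega
        have houter : 1 ≤ j ∧ s ≤ (j : Int) ∧ (j : Int) < s + (x :: xs).length := by
          simp only [List.length_cons]; push_cast; omega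
        rw [if_pos houter, if_pos hj.2, PySem.List.pySetD_of_nonneg _ _ (le_of_lt hj.2)]
        have h0 : ((j : Int) - s).toNat = 0 := by omega
        have hset : s.toNat = j := by omega
        rw [h0, List.getD_cons_zero, hset]
        simp only [List.getD, List.getElem?_set, if_pos hjlt]
        rw [← hj.1]
        simp
      · have houter : ¬ (1 ≤ j ∧ s ≤ (j : Int) ∧ (j : Int) < s + (x :: xs).length) := by
          simp only [List.length_cons]; push_cast; omega
        rw [if_neg houter]
        split
        · next hspos =>
          rw [PySem.List.pySetD_of_nonneg _ _ (le_of_lt hspos)]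
          simp only [List.getD, List.getElem?_set]
          rw [if_neg (by omega)]
        · rfl

def pvLenVal (rb : List Int) (j : Nat) : Int :=
  if 1 ≤ j ∧ j < rb.length then rb.getD j 0 - rb.getD (j - 1) 0 else 0

@[simp] lemma pv_lens_char (rb : List Int) (j : Nat) :
    ((PySem.List.enumerate rb 0).foldl
        (fun ll p => if p.1 > 0 then PySem.List.pySetD ll p.1 (p.2 - PySem.List.pyGetD rb (p.1 - 1) 0) else ll)
        (List.replicate (rb.length + 1) 0)).getD j 0
    = pvLenVal rb j := by
  rw [pv_set_fold (fun i b => b - PySem.List.pyGetD rb (i - 1) 0) rb _ 0 le_rfl (by simp) j]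
  unfold pvLenVal
  by_cases h : 1 ≤ j ∧ j < rb.length
  · rw [if_pos (by constructor; exact h.1; constructor; omega; push_cast; omega), if_pos h]
    have h1 : ((j : Int) - 0).toNat = j := by omega
    have h2 : ((j : Int) - 1) = ((j - 1 : Nat) : Int) := by omega
    rw [h1, h2, PySem.List.pyGetD_natCast]
  · rw [if_neg (by push_cast; omega), if_neg h]
    simp

lemma pv_split3 (dist : Int) (rb : List Int) (l : List (Int × Int)) (a b : Int) (c : List Int) :
    l.foldl (fun (st : Int × Int × List Int) (p : Int × Int) =>
        (if st.1 = -1 ∧ 0 < p.2 then p.1 else st.1,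
         if st.2.1 = -1 ∧ dist < p.2 then p.1 else st.2.1,
         if p.1 > 0 then PySem.List.pySetD st.2.2 p.1 (p.2 - PySem.List.pyGetD rb (p.1 - 1) 0) else st.2.2))
      (a, b, c)
    = (l.foldl (fun z p => if z = -1 ∧ 0 < p.2 then p.1 else z) a,
       l.foldl (fun z p => if z = -1 ∧ dist < p.2 then p.1 else z) b,
       l.foldl (fun ll p => if p.1 > 0 then PySem.List.pySetD ll p.1 (p.2 - PySem.List.pyGetD rb (p.1 - 1) 0) else ll) c) := by
  induction l generalizing a b c with
  | nil => rfl
  | cons x l ih => simp only [List.foldl_cons, ih]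

lemma pv_split2_pos (rk ro lens : List Int) (l : List Int) (a b : Int) :
    l.foldl (fun (s : Int × Int) i =>
        (s.1 + PySem.List.pyGetD rk i 0 * PySem.List.pyGetD lens i 0 + PySem.List.pyGetD ro i 0,
         s.2 + PySem.List.pyGetD lens i 0)) (a, b)
    = (a + (l.map (fun i => PySem.List.pyGetD rk i 0 * PySem.List.pyGetD lens i 0 + PySem.List.pyGetD ro i 0)).sum,
       b + (l.map (fun i => PySem.List.pyGetD lens i 0)).sum) := by
  induction l generalizing a b with
  | nil => simp
  | cons x l ih =>
    simp only [List.foldl_cons, List.map_cons, List.sum_cons]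
    rw [ih]
    simp only [Prod.mk.injEq]
    exact ⟨by ring, by ring⟩

lemma pv_split2_neg (rk ro lens : List Int) (l : List Int) (a b : Int) :
    l.foldl (fun (s : Int × Int) i =>
        (s.1 + (-1) * PySem.List.pyGetD rk i 0 * PySem.List.pyGetD lens i 0 + PySem.List.pyGetD ro i 0,
         s.2 + PySem.List.pyGetD lens i 0)) (a, b)
    = (a + (l.map (fun i => (-1) * PySem.List.pyGetD rk i 0 * PySem.List.pyGetD lens i 0 + PySem.List.pyGetD ro i 0)).sum,
       b + (l.map (fun i => PySem.List.pyGetD lens i 0)).sum) := by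
  induction l generalizing a b with
  | nil => simp
  | cons x l ih =>
    simp only [List.foldl_cons, List.map_cons, List.sum_cons]
    rw [ih]
    simp only [Prod.mk.injEq]
    exact ⟨by ring, by ring⟩

lemma pv_pyRange_map (f : Int → Int) (aN bN : Nat) :
    (PySem.List.pyRange (aN : Int) (bN : Int) 1).map f
    = (List.range' aN (bN - aN)).map (fun (j : Nat) => f (j : Int)) := by
  apply List.ext_getElem
  · simp only [List.length_map, PySem.List.length_pyRange_one, List.length_range']
    omega
  · intro i h1 h2
    simp only [List.getElem_map, PySem.List.getElem_pyRange_one, List.getElem_range']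
    congr 1
    push_cast
    ring

lemma pv_telescope (rb : List Int) (lo m : Nat) :
    ((List.range' lo m).map (fun j => rb.getD j 0 - rb.getD (j - 1) 0)).sum
    = rb.getD (lo + m - 1) 0 - rb.getD (lo - 1) 0 := by
  induction m generalizing lo with
  | zero => simp
  | succ m ih =>
    rw [List.range'_succ]
    simp only [List.map_cons, List.sum_cons, ih (lo + 1)]
    have h1 : lo + 1 - 1 = lo := by omega
    have h2 : lo + 1 + m - 1 = lo + (m + 1) - 1 := by omega
    rw [h1, h2]
    ring

lemma pv_sum_slice (l : List Int) (s m : Nat) (h : s + m ≤ l.length) :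
    ((List.range' s m).map (fun j => l.getD j 0)).sum = ((l.drop s).take m).sum := by
  induction m generalizing s with
  | zero => simp
  | succ m ih =>
    rw [List.range'_succ]
    have hs : s < l.length := by omega
    rw [List.drop_eq_getElem_cons hs]
    simp only [List.map_cons, List.sum_cons, List.take_succ_cons]
    rw [ih (s + 1) (by omega)]
    simp [List.getD, List.getElem?_eq_getElem hs]

@[simp] lemma pv_lenval_diff (rb : List Int) (j : Nat) (h1 : 1 ≤ j) (h2 : j < rb.length) :
    pvLenVal rb j = rb.getD j 0 - rb.getD (j - 1) 0 := by
  unfold pvLenVal; rw [if_pos ⟨h1, h2⟩]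

lemma pv_klens_split (rb rk : List Int) (zN dN : Nat) (hzd : zN ≤ dN) (hd : dN ≤ rb.length) :
    ((List.range' zN (dN - zN)).map (fun j => rk.getD j 0 * pvLenVal rb j)).sum
    = ((List.range' (max zN 1) (dN - max zN 1)).map
        (fun i => rk.getD i 0 * (rb.getD i 0 - rb.getD (i - 1) 0))).sum := by
  rcases Nat.eq_zero_or_pos zN with h0 | h1
  · subst h0
    rcases Nat.eq_zero_or_pos dN with hd0 | hd1
    · subst hd0; simp
    · have hsucc : dN - 0 = (dN - 1) + 1 := by omega
      rw [hsucc, List.range'_succ]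
      simp only [List.map_cons, List.sum_cons]
      have h00 : pvLenVal rb 0 = 0 := by unfold pvLenVal; rw [if_neg (by omega)]
      rw [h00, mul_zero, zero_add]
      have hmax : max 0 1 = 1 := by omega
      rw [hmax]
      apply congrArg
      apply List.map_congr_left
      intro j hj
      rw [List.mem_range'_1] at hj
      rw [pv_lenval_diff rb j (by omega) (by omega)]
  · have hmax : max zN 1 = zN := by omega
    rw [hmax]
    apply congrArg
    apply List.map_congr_left
    intro j hj
    rw [List.mem_range'_1] at hj
    rw [pv_lenval_diff rb j (by omega) (by omega)]

lemma pv_lens_sum (rb : List Int) (zN dN : Nat) (hzd : zN ≤ dN) (hd : dN ≤ rb.length) :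
    ((List.range' zN (dN - zN)).map (fun j => pvLenVal rb j)).sum
    = if zN < dN then rb.getD (dN - 1) 0 - rb.getD (max zN 1 - 1) 0 else 0 := by
  rcases Nat.lt_or_ge zN dN with hlt | hge
  · rw [if_pos hlt]
    rcases Nat.eq_zero_or_pos zN with h0 | h1
    · subst h0
      have hsucc : dN - 0 = (dN - 1) + 1 := by omega
      rw [hsucc, List.range'_succ]
      simp only [List.map_cons, List.sum_cons]
      have h00 : pvLenVal rb 0 = 0 := by unfold pvLenVal; rw [if_neg (by omega)]
      rw [h00, zero_add]
      have hcong : (List.range' 1 (dN - 1)).map (fun j => pvLenVal rb j)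
          = (List.range' 1 (dN - 1)).map (fun j => rb.getD j 0 - rb.getD (j - 1) 0) := by
        apply List.map_congr_left
        intro j hj
        rw [List.mem_range'_1] at hj
        exact pv_lenval_diff rb j (by omega) (by omega)
      rw [hcong, pv_telescope rb 1 (dN - 1)]
      have : 1 + (dN - 1) - 1 = dN - 1 := by omega
      rw [this]
      have : max 0 1 - 1 = 1 - 1 := by omega
      rw [this]
    · have hcong : (List.range' zN (dN - zN)).map (fun j => pvLenVal rb j)
          = (List.range' zN (dN - zN)).map (fun j => rb.getD j 0 - rb.getD (j - 1) 0) := by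
        apply List.map_congr_left
        intro j hj
        rw [List.mem_range'_1] at hj
        exact pv_lenval_diff rb j (by omega) (by omega)
      rw [hcong, pv_telescope rb zN (dN - zN)]
      have e1 : zN + (dN - zN) - 1 = dN - 1 := by omega
      have e2 : max zN 1 = zN := by omega
      rw [e1, e2]
  · have : dN - zN = 0 := by omega
    rw [this, if_neg (by omega)]
    simp

lemma pv_kneg_split (rb rk : List Int) (dN zN : Nat) (hdz : dN < zN) (hz : zN ≤ rb.length) :
    ((List.range' (dN + 1) (zN - (dN + 1))).map (fun j => -1 * rk.getD j 0 * pvLenVal rb j)).sum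
    = ((List.range' (dN + 1) (zN - (dN + 1))).map
        (fun i => -rk.getD i 0 * (rb.getD i 0 - rb.getD (i - 1) 0))).sum := by
  apply congrArg
  apply List.map_congr_left
  intro j hj
  rw [List.mem_range'_1] at hj
  rw [pv_lenval_diff rb j (by omega) (by omega)]
  ring

lemma pv_lens_sum_neg (rb : List Int) (dN zN : Nat) (hdz : dN < zN) (hz : zN ≤ rb.length) :
    ((List.range' (dN + 1) (zN - (dN + 1))).map (fun j => pvLenVal rb j)).sum
    = rb.getD (zN - 1) 0 - rb.getD dN 0 := by
  have hcong : (List.range' (dN + 1) (zN - (dN + 1))).map (fun j => pvLenVal rb j)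
      = (List.range' (dN + 1) (zN - (dN + 1))).map (fun j => rb.getD j 0 - rb.getD (j - 1) 0) := by
    apply List.map_congr_left
    intro j hj
    rw [List.mem_range'_1] at hj
    exact pv_lenval_diff rb j (by omega) (by omega)
  rw [hcong, pv_telescope rb (dN + 1) (zN - (dN + 1))]
  have e1 : dN + 1 + (zN - (dN + 1)) - 1 = zN - 1 := by omega
  have e2 : dN + 1 - 1 = dN := by omega
  rw [e1, e2]

lemma pv_pyRange_map_succ (f : Int → Int) (aN bN : Nat) :
    (PySem.List.pyRange ((aN : Int) + 1) (bN : Int) 1).map f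
    = (List.range' (aN + 1) (bN - (aN + 1))).map (fun (j : Nat) => f (j : Int)) := by
  have h : ((aN : Int) + 1) = ((aN + 1 : Nat) : Int) := by push_cast; ring
  rw [h, pv_pyRange_map]

lemma pv_branch_pos (dist_to_signal : Int) (rb rk ro : List Int) (zN dN : Nat)
    (hzd : zN ≤ dN) (hd : dN ≤ rb.length) (ho : dN ≤ ro.length) :
    (List.foldl (fun (s : Int × Int) run_idx =>
        (s.1 + PySem.List.pyGetD rk run_idx 0 * PySem.List.pyGetD (List.foldl (fun ll p => if p.1 > 0 then PySem.List.pySetD ll p.1 (p.2 - PySem.List.pyGetD rb (p.1 - 1) 0) else ll) (List.replicate (rb.length + 1) 0) (PySem.List.enumerate rb 0)) run_idx 0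
             + PySem.List.pyGetD ro run_idx 0,
         s.2 + PySem.List.pyGetD (List.foldl (fun ll p => if p.1 > 0 then PySem.List.pySetD ll p.1 (p.2 - PySem.List.pyGetD rb (p.1 - 1) 0) else ll) (List.replicate (rb.length + 1) 0) (PySem.List.enumerate rb 0)) run_idx 0)) (0, 0)
        (PySem.List.pyRange (zN : Int) (dN : Int) 1)).1
      + PySem.List.pyGetD rk (dN : Int) 0
        * (dist_to_signal
           - (List.foldl (fun (s : Int × Int) run_idx =>
                (s.1 + PySem.List.pyGetD rk run_idx 0 * PySem.List.pyGetD (List.foldl (fun ll p => if p.1 > 0 then PySem.List.pySetD ll p.1 (p.2 - PySem.List.pyGetD rb (p.1 - 1) 0) else ll) (List.replicate (rb.length + 1) 0) (PySem.List.enumerate rb 0)) run_idx 0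
                     + PySem.List.pyGetD ro run_idx 0,
                 s.2 + PySem.List.pyGetD (List.foldl (fun ll p => if p.1 > 0 then PySem.List.pySetD ll p.1 (p.2 - PySem.List.pyGetD rb (p.1 - 1) 0) else ll) (List.replicate (rb.length + 1) 0) (PySem.List.enumerate rb 0)) run_idx 0)) (0, 0)
                (PySem.List.pyRange (zN : Int) (dN : Int) 1)).2)
      + PySem.List.pyGetD ro (dN : Int) 0
    = ((List.range' (max zN 1) (dN - max zN 1)).map
          (fun i => rk.getD i 0 * (rb.getD i 0 - rb.getD (i - 1) 0))).sum
        + ((ro.drop zN).take (dN - zN)).sum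
      + rk.getD dN 0 * (dist_to_signal
          - if zN < dN then rb.getD (dN - 1) 0 - rb.getD (max zN 1 - 1) 0 else 0)
      + ro.getD dN 0 := by
  rw [pv_split2_pos]
  dsimp only
  rw [pv_pyRange_map (fun i => PySem.List.pyGetD rk i 0 * PySem.List.pyGetD (List.foldl (fun ll p => if p.1 > 0 then PySem.List.pySetD ll p.1 (p.2 - PySem.List.pyGetD rb (p.1 - 1) 0) else ll) (List.replicate (rb.length + 1) 0) (PySem.List.enumerate rb 0)) i 0
        + PySem.List.pyGetD ro i 0) zN dN,
      pv_pyRange_map (fun i => PySem.List.pyGetD (List.foldl (fun ll p => if p.1 > 0 then PySem.List.pySetD ll p.1 (p.2 - PySem.List.pyGetD rb (p.1 - 1) 0) else ll) (List.replicate (rb.length + 1) 0) (PySem.List.enumerate rb 0)) i 0) zN dN]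
  simp only [PySem.List.pyGetD_natCast, pv_lens_char]
  rw [PySem.List.sum_map_add_int]
  rw [pv_klens_split rb rk zN dN hzd hd, pv_lens_sum rb zN dN hzd hd,
      pv_sum_slice ro zN (dN - zN) (by omega)]
  ring

lemma pv_branch_neg (dist_to_signal : Int) (rb rk ro : List Int) (dN zN : Nat)
    (hdz : dN < zN) (hz : zN ≤ rb.length) (ho : zN ≤ ro.length) :
    (List.foldl (fun (s : Int × Int) run_idx =>
        (s.1 + (-1) * PySem.List.pyGetD rk run_idx 0 * PySem.List.pyGetD (List.foldl (fun ll p => if p.1 > 0 then PySem.List.pySetD ll p.1 (p.2 - PySem.List.pyGetD rb (p.1 - 1) 0) else ll) (List.replicate (rb.length + 1) 0) (PySem.List.enumerate rb 0)) run_idx 0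
             + PySem.List.pyGetD ro run_idx 0,
         s.2 + PySem.List.pyGetD (List.foldl (fun ll p => if p.1 > 0 then PySem.List.pySetD ll p.1 (p.2 - PySem.List.pyGetD rb (p.1 - 1) 0) else ll) (List.replicate (rb.length + 1) 0) (PySem.List.enumerate rb 0)) run_idx 0)) (0, 0)
        (PySem.List.pyRange ((dN : Int) + 1) (zN : Int) 1)).1
      + (-1) * PySem.List.pyGetD rk (dN : Int) 0
        * ((List.foldl (fun (s : Int × Int) run_idx =>
              (s.1 + (-1) * PySem.List.pyGetD rk run_idx 0 * PySem.List.pyGetD (List.foldl (fun ll p => if p.1 > 0 then PySem.List.pySetD ll p.1 (p.2 - PySem.List.pyGetD rb (p.1 - 1) 0) else ll) (List.replicate (rb.length + 1) 0) (PySem.List.enumerate rb 0)) run_idx 0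
                   + PySem.List.pyGetD ro run_idx 0,
               s.2 + PySem.List.pyGetD (List.foldl (fun ll p => if p.1 > 0 then PySem.List.pySetD ll p.1 (p.2 - PySem.List.pyGetD rb (p.1 - 1) 0) else ll) (List.replicate (rb.length + 1) 0) (PySem.List.enumerate rb 0)) run_idx 0)) (0, 0)
              (PySem.List.pyRange ((dN : Int) + 1) (zN : Int) 1)).2
           - dist_to_signal)
      + PySem.List.pyGetD ro (dN : Int) 0
    = ((List.range' (dN + 1) (zN - (dN + 1))).map
          (fun i => -rk.getD i 0 * (rb.getD i 0 - rb.getD (i - 1) 0))).sum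
        + ((ro.drop (dN + 1)).take (zN - (dN + 1))).sum
      - rk.getD dN 0 * ((rb.getD (zN - 1) 0 - rb.getD dN 0) - dist_to_signal)
      + ro.getD dN 0 := by
  rw [pv_split2_neg]
  dsimp only
  rw [pv_pyRange_map_succ (fun i => (-1) * PySem.List.pyGetD rk i 0 * PySem.List.pyGetD (List.foldl (fun ll p => if p.1 > 0 then PySem.List.pySetD ll p.1 (p.2 - PySem.List.pyGetD rb (p.1 - 1) 0) else ll) (List.replicate (rb.length + 1) 0) (PySem.List.enumerate rb 0)) i 0
        + PySem.List.pyGetD ro i 0) dN zN,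
      pv_pyRange_map_succ (fun i => PySem.List.pyGetD (List.foldl (fun ll p => if p.1 > 0 then PySem.List.pySetD ll p.1 (p.2 - PySem.List.pyGetD rb (p.1 - 1) 0) else ll) (List.replicate (rb.length + 1) 0) (PySem.List.enumerate rb 0)) i 0) dN zN]
  simp only [PySem.List.pyGetD_natCast, pv_lens_char]
  rw [PySem.List.sum_map_add_int]
  rw [pv_kneg_split rb rk dN zN hdz hz, pv_lens_sum_neg rb dN zN hdz hz,
      pv_sum_slice ro (dN + 1) (zN - (dN + 1)) (by omega)]
  ring

-- ===== B-side lemmas: the prefix tables =====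

def pvFw (e : (Int × Int) × (Int × Int)) : Int := e.1.1 - e.1.2
def pvFf (e : (Int × Int) × (Int × Int)) : Int := e.2.1 * (e.1.1 - e.1.2) + e.2.2
def pvFb (e : (Int × Int) × (Int × Int)) : Int := e.2.2 - e.2.1 * (e.1.1 - e.1.2)

def pvCum (f : (Int × Int) × (Int × Int) → Int) (a : Int) : List ((Int × Int) × (Int × Int)) → List Int
  | [] => []
  | e :: t => (a + f e) :: pvCum f (a + f e) t

lemma pv_pyGetD_concat (l : List Int) (x : Int) : PySem.List.pyGetD (l ++ [x]) (-1) 0 = x := by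
  rw [PySem.List.pyGetD_neg_one (l ++ [x]) 0 (by simp)]
  exact List.getLast_concat

lemma pv_fold_tbl (zs : List ((Int × Int) × (Int × Int))) (A0 B0 C0 : List Int) (a b c : Int)
    (hA : PySem.List.pyGetD A0 (-1) 0 = a) (hB : PySem.List.pyGetD B0 (-1) 0 = b)
    (hC : PySem.List.pyGetD C0 (-1) 0 = c) :
    zs.foldl (fun (P : List Int × List Int × List Int) e =>
        let w := e.1.1 - e.1.2
        (P.1 ++ [PySem.List.pyGetD P.1 (-1) 0 + w],
         P.2.1 ++ [PySem.List.pyGetD P.2.1 (-1) 0 + e.2.1 * w + e.2.2],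
         P.2.2 ++ [PySem.List.pyGetD P.2.2 (-1) 0 - e.2.1 * w + e.2.2])) (A0, B0, C0)
    = (A0 ++ pvCum pvFw a zs, B0 ++ pvCum pvFf b zs, C0 ++ pvCum pvFb c zs) := by
  induction zs generalizing A0 B0 C0 a b c with
  | nil => simp [pvCum]
  | cons e t ih =>
    simp only [List.foldl_cons]
    rw [hA, hB, hC]
    have e1 : a + (e.1.1 - e.1.2) = a + pvFw e := rfl
    have e2 : b + e.2.1 * (e.1.1 - e.1.2) + e.2.2 = b + pvFf e := by unfold pvFf; ring
    have e3 : c - e.2.1 * (e.1.1 - e.1.2) + e.2.2 = c + pvFb e := by unfold pvFb; ring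
    rw [e1, e2, e3]
    rw [ih _ _ _ _ _ _ (pv_pyGetD_concat A0 _) (pv_pyGetD_concat B0 _) (pv_pyGetD_concat C0 _)]
    simp [pvCum, List.append_assoc]

lemma pv_take_range' (s m t : Nat) (h : t ≤ m) : (List.range' s m).take t = List.range' s t := by
  induction m generalizing s t with
  | zero => simp_all
  | succ m ih =>
    cases t with
    | zero => simp
    | succ t =>
      rw [List.range'_succ, List.take_succ_cons, ih (s + 1) t (by omega), List.range'_succ]

lemma pv_cum_getD (f : (Int × Int) × (Int × Int) → Int) (a : Int)
    (zs : List ((Int × Int) × (Int × Int))) (t : Nat) (ht : t < zs.length) :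
    (pvCum f a zs).getD t 0 = a + ((zs.take (t + 1)).map f).sum := by
  induction zs generalizing a t with
  | nil => simp at ht
  | cons e l ih =>
    cases t with
    | zero => simp [pvCum]
    | succ t =>
      simp only [pvCum, List.getD_cons_succ, List.take_succ_cons, List.map_cons, List.sum_cons]
      rw [ih _ t (by simpa using ht)]
      ring

-- the zipped neighbour list and its characterisation as an index map
lemma pv_zl_map (rb rk ro : List Int) (f : (Int × Int) × (Int × Int) → Int) :
    ((((rb.drop 1).zip rb).zip ((rk.drop 1).zip (ro.drop 1))).map f)
    = (List.range' 1 (((rb.drop 1).zip rb).zip ((rk.drop 1).zip (ro.drop 1))).length).map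
        (fun j => f ((rb.getD j 0, rb.getD (j - 1) 0), (rk.getD j 0, ro.getD j 0))) := by
  apply List.ext_getElem
  · simp
  · intro i h1 h2
    simp only [List.getElem_map, List.getElem_range', List.getElem_zip, List.getElem_drop]
    have hlen : i < (((rb.drop 1).zip rb).zip ((rk.drop 1).zip (ro.drop 1))).length := by
      simpa using h1
    simp only [List.length_zip, List.length_drop] at hlen
    congr 1
    have hrb : 1 + i < rb.length := by omega
    have hrk : 1 + i < rk.length := by omega
    have hro : 1 + i < ro.length := by omega
    have h1i : 1 + i - 1 = i := by omega
    simp [List.getD, hrb, hrk, hro, h1i,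
      Nat.lt_of_lt_of_le (by omega : i < 1 + i) (le_of_lt hrb)]

lemma pv_take_sum (rb rk ro : List Int) (f : (Int × Int) × (Int × Int) → Int) (t : Nat)
    (ht : t ≤ (((rb.drop 1).zip rb).zip ((rk.drop 1).zip (ro.drop 1))).length) :
    (((((rb.drop 1).zip rb).zip ((rk.drop 1).zip (ro.drop 1))).take t).map f).sum
    = ((List.range' 1 t).map
        (fun j => f ((rb.getD j 0, rb.getD (j - 1) 0), (rk.getD j 0, ro.getD j 0)))).sum := by
  rw [List.map_take, pv_zl_map rb rk ro f, ← List.map_take, pv_take_range' 1 _ t ht]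

-- getD of the three prefix tables at an admissible index
lemma pv_tbl_getD (x a : Int) (f : (Int × Int) × (Int × Int) → Int)
    (zs : List ((Int × Int) × (Int × Int))) (i : Nat) (h2 : 2 ≤ i) (hi : i ≤ zs.length + 1) :
    (([0, x] ++ pvCum f a zs).getD i 0) = a + ((zs.take (i - 1)).map f).sum := by
  rw [List.getD_append_right _ _ _ _ (by simp; omega)]
  have : i - List.length [0, x] = i - 2 := by simp
  rw [this, pv_cum_getD f a zs (i - 2) (by omega)]
  have e : i - 2 + 1 = i - 1 := by omega
  rw [e]

lemma pv_tbl_getD_small (x a : Int) (f : (Int × Int) × (Int × Int) → Int)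
    (zs : List ((Int × Int) × (Int × Int))) (i : Nat) (h2 : i < 2) :
    (([0, x] ++ pvCum f a zs).getD i 0) = if i = 0 then 0 else x := by
  rw [List.getD_append _ _ _ _ (by simp; omega)]
  interval_cases i <;> rfl

-- closed form of the width prefix table: always rb[i-1] - rb[0] (telescoped)
lemma pv_tblLen (rb rk ro : List Int) (i : Nat)
    (hi : i ≤ (((rb.drop 1).zip rb).zip ((rk.drop 1).zip (ro.drop 1))).length + 1) :
    (([0, 0] ++ pvCum pvFw 0 (((rb.drop 1).zip rb).zip ((rk.drop 1).zip (ro.drop 1)))).getD i 0)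
    = rb.getD (i - 1) 0 - rb.getD 0 0 := by
  by_cases h2 : 2 ≤ i
  · rw [pv_tbl_getD 0 0 pvFw _ i h2 hi, pv_take_sum rb rk ro pvFw (i - 1) (by omega)]
    simp only [pvFw]
    rw [pv_telescope rb 1 (i - 1)]
    have ha : 1 + (i - 1) - 1 = i - 1 := by omega
    rw [ha]
    simp
  · rw [pv_tbl_getD_small 0 0 pvFw _ i (by omega)]
    have : i - 1 = 0 := by omega
    rw [this]
    split <;> simp

-- closed form of the backward score prefix table
lemma pv_tblBwd (rb rk ro : List Int) (i : Nat)
    (hi : i ≤ (((rb.drop 1).zip rb).zip ((rk.drop 1).zip (ro.drop 1))).length + 1) :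
    (([0, 0] ++ pvCum pvFb 0 (((rb.drop 1).zip rb).zip ((rk.drop 1).zip (ro.drop 1)))).getD i 0)
    = ((List.range' 1 (i - 1)).map
        (fun j => ro.getD j 0 - rk.getD j 0 * (rb.getD j 0 - rb.getD (j - 1) 0))).sum := by
  by_cases h2 : 2 ≤ i
  · rw [pv_tbl_getD 0 0 pvFb _ i h2 hi, pv_take_sum rb rk ro pvFb (i - 1) (by omega)]
    simp [pvFb]
  · rw [pv_tbl_getD_small 0 0 pvFb _ i (by omega)]
    have : i - 1 = 0 := by omega
    rw [this]
    split <;> simp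

-- closed form of the forward score prefix table
lemma pv_tblFwd (rb rk ro : List Int) (x : Int) (i : Nat)
    (hi : i ≤ (((rb.drop 1).zip rb).zip ((rk.drop 1).zip (ro.drop 1))).length + 1) :
    (([0, x] ++ pvCum pvFf x (((rb.drop 1).zip rb).zip ((rk.drop 1).zip (ro.drop 1)))).getD i 0)
    = if i = 0 then 0 else
        x + ((List.range' 1 (i - 1)).map
          (fun j => rk.getD j 0 * (rb.getD j 0 - rb.getD (j - 1) 0) + ro.getD j 0)).sum := by
  by_cases h2 : 2 ≤ i
  · rw [pv_tbl_getD x x pvFf _ i h2 hi, pv_take_sum rb rk ro pvFf (i - 1) (by omega),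
        if_neg (by omega)]
    simp [pvFf]
  · rw [pv_tbl_getD_small x x pvFf _ i (by omega)]
    interval_cases i <;> simp

lemma pv_range1_split (t u : Nat) (h1 : 1 ≤ t) (h : t ≤ u) (g : Nat → Int) :
    ((List.range' 1 (u - 1)).map g).sum
    = ((List.range' 1 (t - 1)).map g).sum + ((List.range' t (u - t)).map g).sum := by
  have e : List.range' 1 (t - 1) ++ List.range' (1 + (t - 1)) (u - t)
      = List.range' 1 (t - 1 + (u - t)) := List.range'_append_1
  rw [show u - 1 = t - 1 + (u - t) by omega, ← e, show 1 + (t - 1) = t by omega]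
  simp

-- forward-branch closed form of B
lemma pv_alt_branch_pos (dist_to_signal : Int) (rb rk ro : List Int) (zN dN : Nat)
    (hzd : zN ≤ dN) (hd : dN ≤ rb.length) (hk : dN < rk.length) (ho : dN < ro.length) :
    (([0, PySem.List.pyGetD ro 0 0] ++ pvCum pvFf (PySem.List.pyGetD ro 0 0)
        (((rb.drop 1).zip rb).zip ((rk.drop 1).zip (ro.drop 1)))).getD dN 0
      - ([0, PySem.List.pyGetD ro 0 0] ++ pvCum pvFf (PySem.List.pyGetD ro 0 0)
        (((rb.drop 1).zip rb).zip ((rk.drop 1).zip (ro.drop 1)))).getD zN 0)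
      + rk.getD dN 0 * (dist_to_signal
          - (([0, 0] ++ pvCum pvFw 0 (((rb.drop 1).zip rb).zip ((rk.drop 1).zip (ro.drop 1)))).getD dN 0
             - ([0, 0] ++ pvCum pvFw 0 (((rb.drop 1).zip rb).zip ((rk.drop 1).zip (ro.drop 1)))).getD zN 0))
      + ro.getD dN 0
    = ((List.range' (max zN 1) (dN - max zN 1)).map
          (fun i => rk.getD i 0 * (rb.getD i 0 - rb.getD (i - 1) 0))).sum
        + ((ro.drop zN).take (dN - zN)).sum
      + rk.getD dN 0 * (dist_to_signal
          - if zN < dN then rb.getD (dN - 1) 0 - rb.getD (max zN 1 - 1) 0 else 0)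
      + ro.getD dN 0 := by
  have hx : PySem.List.pyGetD ro 0 0 = ro.getD 0 0 := by simp [pysem]
  have hL : dN ≤ (((rb.drop 1).zip rb).zip ((rk.drop 1).zip (ro.drop 1))).length + 1 := by
    simp only [List.length_zip, List.length_drop]; omega
  have hLz : zN ≤ (((rb.drop 1).zip rb).zip ((rk.drop 1).zip (ro.drop 1))).length + 1 :=
    le_trans hzd hL
  rw [pv_tblFwd rb rk ro _ dN hL, pv_tblFwd rb rk ro _ zN hLz,
      pv_tblLen rb rk ro dN hL, pv_tblLen rb rk ro zN hLz, hx]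
  rcases Nat.eq_zero_or_pos zN with hz0 | hz1
  · subst hz0
    rcases Nat.eq_zero_or_pos dN with hd0 | hd1
    · subst hd0
      simp
    · rw [if_neg (by omega), if_pos rfl, if_pos (by omega)]
      rw [PySem.List.sum_map_add_int]
      rw [← pv_sum_slice ro 0 (dN - 0) (by omega)]
      rw [show dN - 0 = (dN - 1) + 1 by omega, List.range'_succ]
      simp only [List.map_cons, List.sum_cons]
      have hmax : max 0 1 = 1 := rfl
      rw [hmax]
      simp only [Nat.zero_sub]
      ring
  · rw [if_neg (by omega), if_neg (by omega)]
    have hmax : max zN 1 = zN := by omega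
    rw [hmax]
    rcases Nat.lt_or_ge zN dN with hlt | hge
    · rw [if_pos hlt,
          pv_range1_split zN dN hz1 hzd
            (fun j => rk.getD j 0 * (rb.getD j 0 - rb.getD (j - 1) 0) + ro.getD j 0)]
      simp only [PySem.List.sum_map_add_int]
      rw [← pv_sum_slice ro zN (dN - zN) (by omega)]
      ring
    · have hzd' : zN = dN := by omega
      subst hzd'
      rw [if_neg (by omega)]
      simp

-- backward-branch closed form of B
lemma pv_alt_branch_neg (dist_to_signal : Int) (rb rk ro : List Int) (dN zN : Nat)
    (hdz : dN < zN) (hz : zN ≤ rb.length) (hk : zN - 1 < rk.length) (ho : zN - 1 < ro.length) :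
    (([0, 0] ++ pvCum pvFb 0 (((rb.drop 1).zip rb).zip ((rk.drop 1).zip (ro.drop 1)))).getD zN 0
      - ([0, 0] ++ pvCum pvFb 0 (((rb.drop 1).zip rb).zip ((rk.drop 1).zip (ro.drop 1)))).getD (dN + 1) 0)
      - rk.getD dN 0 *
        ((([0, 0] ++ pvCum pvFw 0 (((rb.drop 1).zip rb).zip ((rk.drop 1).zip (ro.drop 1)))).getD zN 0
          - ([0, 0] ++ pvCum pvFw 0 (((rb.drop 1).zip rb).zip ((rk.drop 1).zip (ro.drop 1)))).getD (dN + 1) 0)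
         - dist_to_signal)
      + ro.getD dN 0
    = ((List.range' (dN + 1) (zN - (dN + 1))).map
          (fun i => -rk.getD i 0 * (rb.getD i 0 - rb.getD (i - 1) 0))).sum
        + ((ro.drop (dN + 1)).take (zN - (dN + 1))).sum
      - rk.getD dN 0 * ((rb.getD (zN - 1) 0 - rb.getD dN 0) - dist_to_signal)
      + ro.getD dN 0 := by
  have hL : zN ≤ (((rb.drop 1).zip rb).zip ((rk.drop 1).zip (ro.drop 1))).length + 1 := by
    simp only [List.length_zip, List.length_drop]; omega
  have hLd : dN + 1 ≤ (((rb.drop 1).zip rb).zip ((rk.drop 1).zip (ro.drop 1))).length + 1 :=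
    le_trans (by omega) hL
  rw [pv_tblBwd rb rk ro zN hL, pv_tblBwd rb rk ro (dN + 1) hLd,
      pv_tblLen rb rk ro zN hL, pv_tblLen rb rk ro (dN + 1) hLd]
  rw [pv_range1_split (dN + 1) zN (by omega) (by omega)
        (fun j => ro.getD j 0 - rk.getD j 0 * (rb.getD j 0 - rb.getD (j - 1) 0))]
  have hc : (List.range' (dN + 1) (zN - (dN + 1))).map
      (fun j => ro.getD j 0 - rk.getD j 0 * (rb.getD j 0 - rb.getD (j - 1) 0))
      = (List.range' (dN + 1) (zN - (dN + 1))).map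
      (fun j => -rk.getD j 0 * (rb.getD j 0 - rb.getD (j - 1) 0) + ro.getD j 0) := by
    apply List.map_congr_left; intro j _; ring
  rw [hc]
  have e1 : dN + 1 - 1 = dN := by omega
  rw [e1]
  simp only [PySem.List.sum_map_add_int]
  rw [← pv_sum_slice ro (dN + 1) (zN - (dN + 1)) (by omega)]
  ring

lemma pv_if_cast2 (m : Nat) (x : Int) :
    (if ((m : Nat) : Int) = -1 then x else ((m : Nat) : Int)) = (m : Int) := by
  rw [if_neg (by omega)]

lemma pv_cast_pred (n : Nat) : ((n + 1 : Nat) : Int) - 1 = (n : Int) := by push_cast; ring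

lemma pv_main (dist_to_signal : Int) (rb rk ro : List Int)
    (hpre : Pre_signal_dist_penalty dist_to_signal rb rk ro) :
    signal_dist_penalty dist_to_signal rb rk ro = signal_dist_penalty_alt dist_to_signal rb rk ro := by
  unfold Pre_signal_dist_penalty at hpre
  unfold signal_dist_penalty signal_dist_penalty_alt
  simp only [pv_split3]
  rw [pv_firstIdx_fold (fun b => 0 < b) rb 0 (-1) le_rfl,
      pv_firstIdx_fold (fun b => dist_to_signal < b) rb 0 (-1) le_rfl]
  have h2 : PySem.List.pyGetD [0, PySem.List.pyGetD ro 0 0] (-1) 0 = PySem.List.pyGetD ro 0 0 := by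
    rw [PySem.List.pyGetD_neg_one _ 0 (by simp)]; rfl
  rw [pv_fold_tbl _ [0, 0] [0, PySem.List.pyGetD ro 0 0] [0, 0] 0 (PySem.List.pyGetD ro 0 0) 0
      (by decide) h2 (by decide)]
  dsimp only
  simp only [reduceIte]
  cases hF1 : List.findIdx? (fun b => decide ((0 : Int) < b)) rb with
  | none =>
    cases hF2 : List.findIdx? (fun b => decide (dist_to_signal < b)) rb with
    | none =>
      simp only [Option.getD_none, Option.getD_some, zero_add, ite_true, pv_if_cast2, pv_cast_pred]
      rw [if_pos (show ((rb.length : Nat) : Int) ≥ ((rb.length : Nat) : Int) by omega),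
          if_pos (show rb.length ≥ rb.length by omega)]
      rw [hF1, hF2] at hpre
      simp only [Option.getD_none, le_refl, if_pos] at hpre
      exact (pv_branch_pos dist_to_signal rb rk ro rb.length rb.length le_rfl le_rfl (by omega)).trans
        (pv_alt_branch_pos dist_to_signal rb rk ro rb.length rb.length le_rfl le_rfl
          (by omega) (by omega)).symm
    | some k2 =>
      have hk2 : k2 < rb.length := (List.findIdx?_eq_some_iff_findIdx_eq.mp hF2).1
      simp only [Option.getD_none, Option.getD_some, zero_add, ite_true, pv_if_cast2, pv_cast_pred]
      rw [if_neg (show ¬(((k2 : Nat) : Int) ≥ ((rb.length : Nat) : Int)) by omega),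
          if_neg (show ¬(k2 ≥ rb.length) by omega)]
      rw [hF1, hF2] at hpre
      simp only [Option.getD_none, Option.getD_some] at hpre
      rw [if_neg (by omega)] at hpre
      exact (pv_branch_neg dist_to_signal rb rk ro k2 rb.length hk2 le_rfl (by omega)).trans
        (pv_alt_branch_neg dist_to_signal rb rk ro k2 rb.length hk2 le_rfl
          (by omega) (by omega)).symm
  | some k1 =>
    have hk1 : k1 < rb.length := (List.findIdx?_eq_some_iff_findIdx_eq.mp hF1).1
    cases hF2 : List.findIdx? (fun b => decide (dist_to_signal < b)) rb with
    | none =>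
      simp only [Option.getD_none, Option.getD_some, zero_add, ite_true, pv_if_cast2, pv_cast_pred]
      rw [if_pos (show ((rb.length : Nat) : Int) ≥ ((k1 : Nat) : Int) by omega),
          if_pos (show rb.length ≥ k1 by omega)]
      rw [hF1, hF2] at hpre
      simp only [Option.getD_none, Option.getD_some] at hpre
      rw [if_pos (by omega)] at hpre
      exact (pv_branch_pos dist_to_signal rb rk ro k1 rb.length (by omega) le_rfl (by omega)).trans
        (pv_alt_branch_pos dist_to_signal rb rk ro k1 rb.length (by omega) le_rfl
          (by omega) (by omega)).symm
    | some k2 =>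
      have hk2 : k2 < rb.length := (List.findIdx?_eq_some_iff_findIdx_eq.mp hF2).1
      simp only [Option.getD_none, Option.getD_some, zero_add, ite_true, pv_if_cast2, pv_cast_pred]
      by_cases hc : k1 ≤ k2
      · rw [if_pos (show ((k2 : Nat) : Int) ≥ ((k1 : Nat) : Int) by omega),
            if_pos (show k2 ≥ k1 by omega)]
        rw [hF1, hF2] at hpre
        simp only [Option.getD_some] at hpre
        rw [if_pos (by omega)] at hpre
        exact (pv_branch_pos dist_to_signal rb rk ro k1 k2 hc (by omega) (by omega)).trans
          (pv_alt_branch_pos dist_to_signal rb rk ro k1 k2 hc (by omega)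
            (by omega) (by omega)).symm
      · rw [if_neg (show ¬(((k2 : Nat) : Int) ≥ ((k1 : Nat) : Int)) by omega),
            if_neg (show ¬(k2 ≥ k1) by omega)]
        rw [hF1, hF2] at hpre
        simp only [Option.getD_some] at hpre
        rw [if_neg (by omega)] at hpre
        exact (pv_branch_neg dist_to_signal rb rk ro k2 k1 (by omega) (by omega) (by omega)).trans
          (pv_alt_branch_neg dist_to_signal rb rk ro k2 k1 (by omega) (by omega)
            (by omega) (by omega)).symm

-- ===== VERDICT (by name: the statement is the Claim_ definition above) =====
theorem signal_dist_penalty_spec : Claim_equal_signal_dist_penalty := by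
  intro dist_to_signal region_break_list region_k_list region_offset_list _ hpre
  unfold Spec_signal_dist_penalty
  exact pv_main dist_to_signal region_break_list region_k_list region_offset_list hpre
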